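-- pv_equiv track=rewrite | github.com/EldanGS/bversatile | Problems/EPI/epi_judge_python/06-11-snake_string.py | snake_string2
-- ===== SOURCE A (Python) =====
-- def snake_string2(s):
--     result = ''
--     for i in range(1, len(s), 4):
--         result += s[i]
--     for i in range(0, len(s), 2):
--         result += s[i]
--     for i in range(3, len(s), 4):
--         result += s[i]
--     return result
-- ===== SOURCE B (Python) =====
-- def snake_string2(s):
--     top, middle, bottom = [], [], []
--     for i, c in enumerate(s):
--         if i % 4 == 1:
--             top.append(c)
--         elif i % 2 == 0:
--             middle.append(c)
--         elif i % 4 == 3: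
--             bottom.append(c)
--     return ''.join(top) + ''.join(middle) + ''.join(bottom)
-- ===== Notes on version B (the rewrite author's own statement) =====
-- stated objective: alternative
-- what changed: B replaces A's three separate stride-index scans over the string (with repeated string concatenation) with a single pass over enumerate(s) that dispatches each character by index residue into three list buckets joined once at the end.
import Mathlib
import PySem

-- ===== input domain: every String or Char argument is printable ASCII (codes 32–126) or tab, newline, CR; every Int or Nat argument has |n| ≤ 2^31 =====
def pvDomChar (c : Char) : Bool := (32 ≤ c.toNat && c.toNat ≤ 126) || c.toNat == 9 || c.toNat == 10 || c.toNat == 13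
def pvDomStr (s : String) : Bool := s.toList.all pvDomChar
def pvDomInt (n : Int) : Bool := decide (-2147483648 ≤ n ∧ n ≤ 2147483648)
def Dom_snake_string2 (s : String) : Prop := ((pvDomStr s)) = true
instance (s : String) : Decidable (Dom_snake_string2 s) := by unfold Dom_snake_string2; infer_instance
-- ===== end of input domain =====

-- B replaces A's three stride-index scans with one pass bucketing each character by index residue; same result, same asymptotic cost (objective: alternative).


-- ===== PORT A =====
-- 'result += s[i]': append the indexed character to the accumulated char list
-- (the none branch is unreachable — every i produced by the three ranges is in range).
def snakeStep (s : String) (r : List Char) (i : Int) : List Char :=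
  match PySem.Str.pyGet? s i with
  | some c => r ++ [c]
  | none => r

def snake_string2 (s : String) : String :=
  let n := PySem.Str.len s
  let r1 := (PySem.List.pyRange 1 n 4).foldl (snakeStep s) []
  let r2 := (PySem.List.pyRange 0 n 2).foldl (snakeStep s) r1
  let r3 := (PySem.List.pyRange 3 n 4).foldl (snakeStep s) r2
  String.ofList r3

-- ===== PORT B =====
-- one pass over enumerate(s): dispatch each char into top/middle/bottom by index residue
def snakeDispatch (acc : List Char × List Char × List Char) (p : Int × Char) :
    List Char × List Char × List Char :=
  if p.1 % 4 == 1 then (acc.1 ++ [p.2], acc.2.1, acc.2.2)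
  else if p.1 % 2 == 0 then (acc.1, acc.2.1 ++ [p.2], acc.2.2)
  else if p.1 % 4 == 3 then (acc.1, acc.2.1, acc.2.2 ++ [p.2])
  else acc

def snake_string2_alt (s : String) : String :=
  let r := (PySem.List.enumerate s.toList 0).foldl snakeDispatch ([], [], [])
  String.ofList (r.1 ++ r.2.1 ++ r.2.2)

-- ===== PRECONDITION & SPEC =====
def Spec_snake_string2 (s : String) (out : String) : Prop := out = snake_string2_alt s
instance (s : String) (out : String) : Decidable (Spec_snake_string2 s out) := by unfold Spec_snake_string2; infer_instance

-- ===== CLAIM (what is proved, stated in full; the proofs are below) =====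
def Claim_equal_snake_string2 : Prop := ∀ (s : String), Dom_snake_string2 s → Spec_snake_string2 s (snake_string2 s)

-- ===== LEMMAS AND PROOFS =====

-- selection of the chars of l whose (running) index satisfies p
def sel (p : Int → Bool) : List Char → Int → List Char
  | [], _ => []
  | c :: cs, i => (if p i then [c] else []) ++ sel p cs (i + 1)

lemma foldl_snakeStep (s : String) (idx : List Int) (r : List Char) :
    idx.foldl (snakeStep s) r = r ++ idx.filterMap (PySem.Str.pyGet? s) := by
  induction idx generalizing r with
  | nil => simp
  | cons i idx ih =>
      simp only [List.foldl_cons, List.filterMap_cons, ih, snakeStep]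
      cases PySem.Str.pyGet? s i <;> simp

lemma foldl_snakeDispatch (l : List Char) (i0 : Int) (t m b : List Char) :
    (PySem.List.enumerate l i0).foldl snakeDispatch (t, m, b) =
      (t ++ sel (fun i => i % 4 == 1) l i0,
       m ++ sel (fun i => !(i % 4 == 1) && i % 2 == 0) l i0,
       b ++ sel (fun i => !(i % 4 == 1) && !(i % 2 == 0) && i % 4 == 3) l i0) := by
  induction l generalizing i0 t m b with
  | nil => simp [PySem.List.enumerate_nil, sel]
  | cons c cs ih =>
      rw [PySem.List.enumerate_cons, List.foldl_cons]
      simp only [snakeDispatch, sel]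
      by_cases h1 : (i0 % 4 == 1) = true
      · simp [h1, ih]
      · by_cases h2 : (i0 % 2 == 0) = true
        · simp [h1, h2, ih]
        · by_cases h3 : (i0 % 4 == 3) = true
          · simp [h1, h2, h3, ih]
          · simp [h1, h2, h3, ih]

lemma sel_append_singleton (p : Int → Bool) (l : List Char) (c : Char) (i : Int) :
    sel p (l ++ [c]) i = sel p l i ++ (if p (i + l.length) then [c] else []) := by
  induction l generalizing i with
  | nil => simp [sel]
  | cons d l ih =>
      simp only [List.cons_append, sel, ih]
      have : i + 1 + (l.length : Int) = i + (l.length + 1 : Nat) := by push_cast; ring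
      rw [this]
      simp [List.append_assoc]

lemma sel_eq_filter (p : Int → Bool) (l : List Char) :
    sel p l 0 =
      ((List.range l.length).filter (fun (j : Nat) => p (j : Int))).filterMap
        (fun (j : Nat) => l[j]?) := by
  induction l using List.reverseRecOn with
  | nil => simp [sel]
  | append_singleton l c ih =>
      rw [sel_append_singleton, ih]
      simp only [List.length_append, List.length_singleton, List.range_succ,
        List.filter_append, List.filterMap_append]
      congr 1
      · apply List.filterMap_congr
        intro j hj
        have hlt : j < l.length := List.mem_range.mp (List.mem_of_mem_filter hj)
        rw [List.getElem?_append_left hlt]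
      · by_cases hp : p (l.length : Int) = true
        · simp [hp]
        · simp [hp]

-- the pyRange stride loops of A pick exactly the indices of range n whose residue fits
lemma pyRange_eq_filter_range (a k : Int) (ha : 0 ≤ a) (hk : 0 < k) (n : Nat) :
    PySem.List.pyRange a n k =
      ((List.range n).map (fun (j : Nat) => (j : Int))).filter
        (fun i => a ≤ i && (i - a) % k == 0) := by
  have hsorted₁ : (PySem.List.pyRange a n k).Pairwise (· < ·) := by
    rw [PySem.List.pyRange_of_pos _ _ hk]
    refine List.Pairwise.map _ ?_ List.pairwise_lt_range
    intro x y hxy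
    have : (x : Int) < (y : Int) := by exact_mod_cast hxy
    nlinarith
  have hsorted₂ :
      (((List.range n).map (fun (j : Nat) => (j : Int))).filter
        (fun i => a ≤ i && (i - a) % k == 0)).Pairwise (· < ·) := by
    apply List.Pairwise.filter
    refine List.Pairwise.map _ ?_ List.pairwise_lt_range
    intro x y hxy
    exact_mod_cast hxy
  have hmem : ∀ x : Int, x ∈ PySem.List.pyRange a n k ↔
      x ∈ ((List.range n).map (fun (j : Nat) => (j : Int))).filter
        (fun i => a ≤ i && (i - a) % k == 0) := by
    intro x
    rw [PySem.List.mem_pyRange_iff_of_pos hk, List.mem_filter]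
    simp only [List.mem_map, List.mem_range]
    constructor
    · rintro ⟨h1, h2, h3⟩
      have hx0 : 0 ≤ x := le_trans ha h1
      refine ⟨⟨x.toNat, by omega, by omega⟩, ?_⟩
      have : (x - a) % k = 0 := Int.emod_eq_zero_of_dvd h3
      simp [h1, this]
    · rintro ⟨⟨j, hj, rfl⟩, h⟩
      simp only [Bool.and_eq_true, decide_eq_true_eq, beq_iff_eq] at h
      exact ⟨h.1, by exact_mod_cast hj, Int.dvd_of_emod_eq_zero h.2⟩
  have hperm : (PySem.List.pyRange a n k).Perm
      (((List.range n).map (fun (j : Nat) => (j : Int))).filter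
        (fun i => a ≤ i && (i - a) % k == 0)) := by
    apply List.perm_of_nodup_nodup_toFinset_eq hsorted₁.nodup hsorted₂.nodup
    ext x
    simp only [List.mem_toFinset]
    exact hmem x
  exact hperm.eq_of_pairwise (fun a b _ _ h h' => le_antisymm h h')
    (hsorted₁.imp le_of_lt) (hsorted₂.imp le_of_lt)

lemma stride_loop_eq (s : String) (a k : Int) (ha : 0 ≤ a) (hk : 0 < k) :
    (PySem.List.pyRange a (PySem.Str.len s) k).filterMap (PySem.Str.pyGet? s) =
      ((List.range s.toList.length).filter
          (fun (j : Nat) => a ≤ (j : Int) && ((j : Int) - a) % k == 0)).filterMap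
        (fun (j : Nat) => s.toList[j]?) := by
  have hlen : PySem.Str.len s = (s.toList.length : Int) := by
    simp [PySem.Str.len_eq]
  rw [hlen, pyRange_eq_filter_range a k ha hk, List.filter_map, List.filterMap_map]
  simp only [Function.comp]
  apply List.filterMap_congr
  intro j _
  simp

lemma filter_congr_range {p q : Nat → Bool} (n : Nat) (h : ∀ j, p j = q j) :
    (List.range n).filter p = (List.range n).filter q :=
  List.filter_congr (fun j _ => h j)

theorem snake_string2_spec_aux (s : String) :
    snake_string2 s = snake_string2_alt s := by
  unfold snake_string2 snake_string2_alt
  simp only [foldl_snakeStep, foldl_snakeDispatch, List.nil_append]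
  rw [sel_eq_filter, sel_eq_filter, sel_eq_filter]
  rw [stride_loop_eq s 1 4 (by norm_num) (by norm_num),
      stride_loop_eq s 0 2 (by norm_num) (by norm_num),
      stride_loop_eq s 3 4 (by norm_num) (by norm_num)]
  have e1 : ((List.range s.toList.length).filter
        (fun (j : Nat) => (1 : Int) ≤ (j : Int) && ((j : Int) - 1) % 4 == 0)) =
      ((List.range s.toList.length).filter (fun (j : Nat) => (j : Int) % 4 == 1)) := by
    apply filter_congr_range
    intro j
    rw [Bool.eq_iff_iff]
    simp only [Bool.and_eq_true, decide_eq_true_eq, beq_iff_eq]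
    omega
  have e2 : ((List.range s.toList.length).filter
        (fun (j : Nat) => (0 : Int) ≤ (j : Int) && ((j : Int) - 0) % 2 == 0)) =
      ((List.range s.toList.length).filter
        (fun (j : Nat) => !((j : Int) % 4 == 1) && (j : Int) % 2 == 0)) := by
    apply filter_congr_range
    intro j
    rw [Bool.eq_iff_iff]
    simp only [Bool.and_eq_true, decide_eq_true_eq, beq_iff_eq, Bool.not_eq_true',
      beq_eq_false_iff_ne, ne_eq]
    omega
  have e3 : ((List.range s.toList.length).filter
        (fun (j : Nat) => (3 : Int) ≤ (j : Int) && ((j : Int) - 3) % 4 == 0)) =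
      ((List.range s.toList.length).filter
        (fun (j : Nat) => !((j : Int) % 4 == 1) && !((j : Int) % 2 == 0) && (j : Int) % 4 == 3)) := by
    apply filter_congr_range
    intro j
    rw [Bool.eq_iff_iff]
    simp only [Bool.and_eq_true, decide_eq_true_eq, beq_iff_eq, Bool.not_eq_true',
      beq_eq_false_iff_ne, ne_eq]
    omega
  rw [e1, e2, e3]

-- ===== VERDICT (by name: the statement is the Claim_ definition above) =====
theorem snake_string2_spec : Claim_equal_snake_string2 := by
  intro s _
  unfold Spec_snake_string2
  exact snake_string2_spec_aux s
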